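-- pv_equiv track=rewrite | github.com/elifleaf/Clusterkit | clusterkit/MathKit.py | grporderPermute
-- ===== SOURCE A (Python) =====
-- def grporderPermute(Lst,GrpLst):
--     '''
--     Find the permution of group list
--
--     Args:
--         Lst: The original list, somthing like [1,100,1000]
--         GrpLst: the list of group of Lst, something like [[0,1],2]
--     '''
--     LstLen = len(Lst); GrpLen = len(GrpLst);
--     PermuteGrp = []; flag = 0;
--     for GrpInd1, Grp1 in enumerate(GrpLst):
--         for GrpInd2 in range(GrpInd1,GrpLen):
--             Grp2 = GrpLst[GrpInd2];
--             PermuteGrp.append([]);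
--             for i in Grp1:
--                 for j in Grp2:
--                     PermuteGrp[flag].append((i,j));
--             if len(PermuteGrp[flag]) == 1: #Should have at least 1 item
--                 PermuteGrp.remove(PermuteGrp[flag]);
--             else:
--                 flag += 1;
--     PermuteGrpLst = [[] for i in range(len(PermuteGrp))];
--     PermuteLst = [[] for i in range(len(PermuteGrp))];
--     Count = 0;
--     for i in range(LstLen):
--         for j in range(i+1,LstLen):
--             for PInd,Permute in enumerate(PermuteGrp):
--                 if (i,j) in Permute:
--                     PermuteGrpLst[PInd].append(Count);
--                     PermuteLst[PInd].append((i,j));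
--                     break;
--             Count += 1;
--     return PermuteGrpLst
-- ===== SOURCE B (Python) =====
-- def grporderPermute(Lst, GrpLst):
--     n = len(Lst)
--     m = len(GrpLst)
--     # phase 1: all cross-product pair groups (a <= b), singletons dropped
--     groups = []
--     for a in range(m):
--         for b in range(a, m):
--             pairs = [(i, j) for i in GrpLst[a] for j in GrpLst[b]]
--             if len(pairs) != 1:
--                 groups.append(pairs)
--     # phase 2: index each pair by the FIRST group containing it (one pass over groups),
--     # then a single pass over ordered pairs with O(1) lookup
--     owner = {}
--     for gi, pairs in enumerate(groups):
--         for p in pairs: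
--             if p not in owner:
--                 owner[p] = gi
--     out = [[] for _ in groups]
--     count = 0
--     for i in range(n):
--         for j in range(i + 1, n):
--             gi = owner.get((i, j))
--             if gi is not None:
--                 out[gi].append(count)
--             count += 1
--     return out
-- ===== Notes on version B (the rewrite author's own statement) =====
-- stated objective: faster
-- what changed: A scans every permutation group for each ordered pair (i,j); B builds the cross-product groups by comprehension (no append-then-remove mutation) and a first-owner dictionary in one pass over the groups, so the per-pair inner scan over all groups disappears and each (i,j) is assigned by an O(1) lookup.
import Mathlib
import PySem

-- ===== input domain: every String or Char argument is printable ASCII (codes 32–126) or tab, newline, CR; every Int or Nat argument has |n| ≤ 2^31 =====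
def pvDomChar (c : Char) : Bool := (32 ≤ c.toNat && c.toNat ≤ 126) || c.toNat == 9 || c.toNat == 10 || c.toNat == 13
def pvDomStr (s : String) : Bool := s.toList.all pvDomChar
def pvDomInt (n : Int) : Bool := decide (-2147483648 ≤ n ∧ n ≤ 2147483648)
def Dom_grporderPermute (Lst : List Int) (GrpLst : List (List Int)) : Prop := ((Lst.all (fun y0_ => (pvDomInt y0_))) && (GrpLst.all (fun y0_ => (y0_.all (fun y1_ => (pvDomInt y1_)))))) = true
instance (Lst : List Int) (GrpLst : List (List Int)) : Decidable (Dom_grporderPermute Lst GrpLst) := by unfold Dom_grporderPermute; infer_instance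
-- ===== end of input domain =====

-- B replaces A's per-pair scan over all groups by a first-owner dictionary built in one pass
-- over the groups, so the inner scan disappears (alternative/faster on large inputs).

-- ===== PORT A =====
-- the nested 'for i in Grp1: for j in Grp2: PermuteGrp[flag].append((i,j))'
def crossA (g1 g2 : List Int) : List (Int × Int) :=
  g1.foldl (fun acc i => g2.foldl (fun acc2 j => acc2 ++ [(i, j)]) acc) []

-- body of the 'for GrpInd2 in range(GrpInd1, GrpLen)' loop; state = (PermuteGrp, flag)
def stepA (GrpLst : List (List Int)) (Grp1 : List Int)
    (st : List (List (Int × Int)) × Int) (GrpInd2 : Int) : List (List (Int × Int)) × Int :=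
  let Grp2 := PySem.List.pyGetD GrpLst GrpInd2 []
  let pg := st.1 ++ [crossA Grp1 Grp2]
  let cur := PySem.List.pyGetD pg st.2 []
  if cur.length == 1 then ((PySem.List.remove? pg cur).getD pg, st.2)
  else (pg, st.2 + 1)

def phase1A (GrpLst : List (List Int)) : List (List (Int × Int)) × Int :=
  (PySem.List.enumerate GrpLst 0).foldl
    (fun st pr => (PySem.List.pyRange pr.1 (PySem.List.len GrpLst) 1).foldl (stepA GrpLst pr.2) st)
    ([], 0)

-- body of the 'for j in range(i+1, LstLen)' loop; enumerate+break = first group containing (i,j)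
def innerA (PermuteGrp : List (List (Int × Int))) (i : Int)
    (st : List (List Int) × List (List (Int × Int)) × Int) (j : Int) :
    List (List Int) × List (List (Int × Int)) × Int :=
  match PermuteGrp.findIdx? (fun Permute => Permute.contains (i, j)) with
  | some PInd => (st.1.modify PInd (· ++ [st.2.2]), st.2.1.modify PInd (· ++ [(i, j)]), st.2.2 + 1)
  | none => (st.1, st.2.1, st.2.2 + 1)

def grporderPermute (Lst : List Int) (GrpLst : List (List Int)) : List (List Int) :=
  let LstLen : Int := PySem.List.len Lst
  let PermuteGrp := (phase1A GrpLst).1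
  ((PySem.List.pyRange 0 LstLen 1).foldl
      (fun st i => (PySem.List.pyRange (i + 1) LstLen 1).foldl (innerA PermuteGrp i) st)
      (List.replicate PermuteGrp.length [], List.replicate PermuteGrp.length [], (0 : Int))).1

-- ===== PORT B =====
-- '[(i, j) for i in GrpLst[a] for j in GrpLst[b]]'
def crossB (GrpLst : List (List Int)) (a b : Int) : List (Int × Int) :=
  (PySem.List.pyGetD GrpLst a []).flatMap (fun i => (PySem.List.pyGetD GrpLst b []).map (fun j => (i, j)))

def groupsB (GrpLst : List (List Int)) : List (List (Int × Int)) :=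
  let m : Int := PySem.List.len GrpLst
  (PySem.List.pyRange 0 m 1).foldl (fun acc a =>
    (PySem.List.pyRange a m 1).foldl (fun acc2 b =>
      let pairs := crossB GrpLst a b
      if pairs.length == 1 then acc2 else acc2 ++ [pairs]) acc) []

-- 'for gi, pairs in enumerate(groups): for p in pairs: if p not in owner: owner[p] = gi'
def ownerB (groups : List (List (Int × Int))) : PySem.Dict (Int × Int) Nat :=
  groups.zipIdx.foldl (fun d pr =>
    pr.1.foldl (fun d p => if d.contains p then d else d.insert p pr.2) d) PySem.Dict.empty

def innerB (owner : PySem.Dict (Int × Int) Nat) (i : Int)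
    (st : List (List Int) × Int) (j : Int) : List (List Int) × Int :=
  match owner.get? (i, j) with
  | some gi => (st.1.modify gi (· ++ [st.2]), st.2 + 1)
  | none => (st.1, st.2 + 1)

def grporderPermute_alt (Lst : List Int) (GrpLst : List (List Int)) : List (List Int) :=
  let n : Int := PySem.List.len Lst
  let groups := groupsB GrpLst
  let owner := ownerB groups
  ((PySem.List.pyRange 0 n 1).foldl
      (fun st i => (PySem.List.pyRange (i + 1) n 1).foldl (innerB owner i) st)
      (List.replicate groups.length [], (0 : Int))).1

-- ===== PRECONDITION & SPEC =====
def Spec_grporderPermute (Lst : List Int) (GrpLst : List (List Int)) (out : List (List Int)) : Prop := out = grporderPermute_alt Lst GrpLst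
instance (Lst : List Int) (GrpLst : List (List Int)) (out : List (List Int)) : Decidable (Spec_grporderPermute Lst GrpLst out) := by unfold Spec_grporderPermute; infer_instance

-- ===== CLAIM (what is proved, stated in full; the proofs are below) =====
def Claim_equal_grporderPermute : Prop := ∀ (Lst : List Int) (GrpLst : List (List Int)), Dom_grporderPermute Lst GrpLst → Spec_grporderPermute Lst GrpLst (grporderPermute Lst GrpLst)

-- ===== LEMMAS AND PROOFS =====

theorem crossA_eq (GrpLst : List (List Int)) (a b : Int) :
    crossA (PySem.List.pyGetD GrpLst a []) (PySem.List.pyGetD GrpLst b []) = crossB GrpLst a b := by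
  unfold crossA crossB
  simp only [PySem.List.foldl_append_singleton_eq_map]
  rw [PySem.List.foldl_append_eq_flatMap]
  simp

theorem getD_append_len {α : Type} (pg : List α) (c d : α) :
    PySem.List.pyGetD (pg ++ [c]) (pg.length : Int) d = c := by
  simp [PySem.List.pyGetD_natCast, List.getD]

theorem remove?_append_self {α : Type} [BEq α] [LawfulBEq α] (pg : List α) (c : α) (h : c ∉ pg) :
    PySem.List.remove? (pg ++ [c]) c = some pg := by
  rw [PySem.List.remove?_eq_some_erase _ c (by simp)]
  rw [List.erase_append_right _ h]
  simp

-- one row of A's phase 1, over an arbitrary index list, with the kept-groups invariant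
theorem rowA (GrpLst : List (List Int)) (Grp1 : List Int) (l : List Int)
    (pg : List (List (Int × Int))) (h : ∀ g ∈ pg, g.length ≠ 1) :
    l.foldl (stepA GrpLst Grp1) (pg, (pg.length : Int)) =
      (pg ++ (l.map (fun b => crossA Grp1 (PySem.List.pyGetD GrpLst b []))).filter
          (fun g => !(g.length == 1)),
        ((pg ++ (l.map (fun b => crossA Grp1 (PySem.List.pyGetD GrpLst b []))).filter
          (fun g => !(g.length == 1))).length : Int)) := by
  induction l generalizing pg with
  | nil => simp
  | cons b t ih =>
    simp only [List.foldl_cons, List.map_cons, List.filter_cons]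
    have hstep : stepA GrpLst Grp1 (pg, (pg.length : Int)) b =
        if (crossA Grp1 (PySem.List.pyGetD GrpLst b [])).length == 1 then (pg, (pg.length : Int))
        else (pg ++ [crossA Grp1 (PySem.List.pyGetD GrpLst b [])],
          ((pg ++ [crossA Grp1 (PySem.List.pyGetD GrpLst b [])]).length : Int)) := by
      unfold stepA
      simp only [getD_append_len]
      by_cases hc : (crossA Grp1 (PySem.List.pyGetD GrpLst b [])).length = 1
      · have hnot : crossA Grp1 (PySem.List.pyGetD GrpLst b []) ∉ pg := by
          intro hmem; exact h _ hmem hc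
        simp [hc, remove?_append_self _ _ hnot]
      · simp [hc]
    rw [hstep]
    by_cases hc : (crossA Grp1 (PySem.List.pyGetD GrpLst b [])).length = 1
    · rw [if_pos (by simpa using hc), ih pg h]
      simp [hc]
    · rw [if_neg (by simpa using hc)]
      have h' : ∀ g ∈ pg ++ [crossA Grp1 (PySem.List.pyGetD GrpLst b [])], g.length ≠ 1 := by
        intro g hg
        rcases List.mem_append.mp hg with hg | hg
        · exact h g hg
        · simp at hg; subst hg; exact hc
      rw [ih _ h']
      simp [hc]

-- the outer loop of A's phase 1 over an arbitrary list of row indices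
theorem outerA (GrpLst : List (List Int)) (l : List Int)
    (pg : List (List (Int × Int))) (h : ∀ g ∈ pg, g.length ≠ 1) :
    (l.foldl (fun st a =>
        (PySem.List.pyRange a (PySem.List.len GrpLst) 1).foldl
          (stepA GrpLst (PySem.List.pyGetD GrpLst a [])) st) (pg, (pg.length : Int))).1 =
      pg ++ l.flatMap (fun a =>
        ((PySem.List.pyRange a (PySem.List.len GrpLst) 1).map
            (fun b => crossA (PySem.List.pyGetD GrpLst a []) (PySem.List.pyGetD GrpLst b []))).filter
          (fun g => !(g.length == 1))) := by
  induction l generalizing pg with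
  | nil => simp
  | cons a t ih =>
    simp only [List.foldl_cons, List.flatMap_cons]
    rw [rowA GrpLst _ _ pg h]
    rw [ih _ (by
      intro g hg
      rcases List.mem_append.mp hg with hg | hg
      · exact h g hg
      · have := List.of_mem_filter hg; simpa using this)]
    simp

theorem foldl_skip {γ : Type} (f : Int → List γ) (l : List Int) (acc : List (List γ)) :
    l.foldl (fun acc2 b => if (f b).length == 1 then acc2 else acc2 ++ [f b]) acc
      = acc ++ (l.map f).filter (fun g => !(g.length == 1)) := by
  induction l generalizing acc with
  | nil => simp
  | cons b t ih =>
    simp only [List.foldl_cons, List.map_cons, List.filter_cons]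
    by_cases hc : (f b).length = 1
    · rw [if_pos (by simpa using hc), ih]
      simp [hc]
    · rw [if_neg (by simpa using hc), ih]
      simp [hc]

theorem groupsB_eq (GrpLst : List (List Int)) :
    groupsB GrpLst = (PySem.List.pyRange 0 (PySem.List.len GrpLst) 1).flatMap (fun a =>
      ((PySem.List.pyRange a (PySem.List.len GrpLst) 1).map (crossB GrpLst a)).filter
        (fun g => !(g.length == 1))) := by
  unfold groupsB
  simp only [foldl_skip]
  rw [PySem.List.foldl_append_eq_flatMap]
  simp

theorem phase1A_eq (GrpLst : List (List Int)) : (phase1A GrpLst).1 = groupsB GrpLst := by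
  unfold phase1A
  rw [PySem.List.enumerate_eq_map_pyRange GrpLst []]
  rw [List.foldl_map]
  have h0 : ((0 : Int)) = ((([] : List (List (Int × Int))).length : Int)) := by simp
  rw [groupsB_eq]
  calc _ = ([] : List (List (Int × Int))) ++ (PySem.List.pyRange 0 (PySem.List.len GrpLst) 1).flatMap (fun a =>
        ((PySem.List.pyRange a (PySem.List.len GrpLst) 1).map
            (fun b => crossA (PySem.List.pyGetD GrpLst a []) (PySem.List.pyGetD GrpLst b []))).filter
          (fun g => !(g.length == 1))) := by
          rw [← outerA GrpLst _ [] (by simp)]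
          rfl
    _ = _ := by simp only [List.nil_append, crossA_eq]

theorem ownerB_inner (pairs : List (Int × Int)) (k : Nat) (d : PySem.Dict (Int × Int) Nat) (p : Int × Int) :
    (pairs.foldl (fun d q => if d.contains q then d else d.insert q k) d).get? p
      = if p ∈ pairs ∧ d.contains p = false then some k else d.get? p := by
  induction pairs generalizing d with
  | nil => simp
  | cons q rest ih =>
    simp only [List.foldl_cons]
    by_cases hq : d.contains q
    · rw [if_pos hq, ih]
      by_cases hpq : p = q
      · subst hpq
        simp [hq]
      · simp [hpq]
    · rw [if_neg hq, ih]
      by_cases hpq : p = q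
      · subst hpq
        have hc : (d.insert p k).contains p = true := by
          simp [PySem.Dict.contains_insert_self]
        simp [hc, hq, PySem.Dict.get?_insert_self]
      · have hc : (d.insert q k).contains p = d.contains p := by
          rw [PySem.Dict.contains_insert]
          simp [hpq]
        have hg : (d.insert q k).get? p = d.get? p := by
          rw [PySem.Dict.get?_insert]; simp [hpq]
        simp [hc, hg, hpq]

theorem ownerB_aux (gs : List (List (Int × Int))) (k : Nat) (d : PySem.Dict (Int × Int) Nat) (p : Int × Int) :
    ((gs.zipIdx k).foldl (fun d pr =>
        pr.1.foldl (fun d q => if d.contains q then d else d.insert q pr.2) d) d).get? p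
      = if d.contains p then d.get? p
        else (gs.findIdx? (fun g => g.contains p)).map (· + k) := by
  induction gs generalizing k d with
  | nil =>
    by_cases hc : d.contains p
    · simp [hc]
    · simp [hc]
      rw [PySem.Dict.get?_eq_none_iff_contains]
      simpa using hc
  | cons g gs ih =>
    rw [List.zipIdx_cons]
    simp only [List.foldl_cons]
    rw [ih]
    have hin := ownerB_inner g k d p
    by_cases hdp : d.contains p
    · have hc' : (g.foldl (fun d q => if d.contains q then d else d.insert q k) d).contains p = true := by
        rw [PySem.Dict.contains_eq_isSome_get?, hin]
        by_cases hm : p ∈ g <;> simp [hm, hdp] <;>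
          (rw [← PySem.Dict.contains_eq_isSome_get?]; exact hdp)
      rw [if_pos hc', hin, if_pos hdp]
      simp [hdp]
    · by_cases hm : p ∈ g
      · have hc' : (g.foldl (fun d q => if d.contains q then d else d.insert q k) d).contains p = true := by
          rw [PySem.Dict.contains_eq_isSome_get?, hin]
          simp [hm, hdp]
        rw [if_pos hc', hin, List.findIdx?_cons]
        have hg : g.contains p = true := by simpa using hm
        simp [hm, hdp]
      · have hc' : (g.foldl (fun d q => if d.contains q then d else d.insert q k) d).contains p = d.contains p := by
          rw [PySem.Dict.contains_eq_isSome_get?, hin]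
          simp [hm]
          rw [← PySem.Dict.contains_eq_isSome_get?]
        rw [hc', if_neg hdp, if_neg hdp, List.findIdx?_cons]
        have hg : g.contains p = false := by simpa using hm
        simp only [hg]
        cases List.findIdx? (fun g => g.contains p) gs with
        | none => rfl
        | some v => simp; omega

theorem ownerB_get? (groups : List (List (Int × Int))) (p : Int × Int) :
    (ownerB groups).get? p = groups.findIdx? (fun g => g.contains p) := by
  unfold ownerB
  rw [show groups.zipIdx = groups.zipIdx 0 from rfl, ownerB_aux]
  simp [PySem.Dict.contains_empty]

-- the two phase-2 loop bodies agree through the projection dropping A's dead PermuteLst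
theorem inner_hom (groups : List (List (Int × Int))) (i : Int)
    (st : List (List Int) × List (List (Int × Int)) × Int) (j : Int) :
    innerB (ownerB groups) i (st.1, st.2.2) j =
      ((innerA groups i st j).1, (innerA groups i st j).2.2) := by
  unfold innerA innerB
  rw [ownerB_get? groups (i, j)]
  cases List.findIdx? (fun Permute => Permute.contains (i, j)) groups <;> simp

-- ===== VERDICT (by name: the statement is the Claim_ definition above) =====
theorem grporderPermute_spec : Claim_equal_grporderPermute := by
  intro Lst GrpLst _
  unfold Spec_grporderPermute grporderPermute grporderPermute_alt
  simp only [phase1A_eq]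
  have houter := List.foldl_hom
    (f := fun (s : List (List Int) × List (List (Int × Int)) × Int) => (s.1, s.2.2))
    (g₁ := fun st i => (PySem.List.pyRange (i + 1) (PySem.List.len Lst) 1).foldl
      (innerA (groupsB GrpLst) i) st)
    (g₂ := fun st i => (PySem.List.pyRange (i + 1) (PySem.List.len Lst) 1).foldl
      (innerB (ownerB (groupsB GrpLst)) i) st)
    (l := PySem.List.pyRange 0 (PySem.List.len Lst) 1)
    (init := (List.replicate (groupsB GrpLst).length [],
      List.replicate (groupsB GrpLst).length [], (0 : Int)))
    (by
      intro x y
      exact List.foldl_hom _ (fun s j => inner_hom (groupsB GrpLst) y s j))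
  exact congrArg Prod.fst houter.symm
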